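-- pv_equiv track=rewrite | github.com/PopSergius/univer | security/project_4.py | add_big_numbers
-- ===== SOURCE A (Python) =====
-- BASE = 10**4  # Block base (10000) — each block stores up to 4 digits
--
-- def add_big_numbers(a_blocks, b_blocks):
--     max_len = max(len(a_blocks), len(b_blocks))
--     a_blocks = [0] * (max_len - len(a_blocks)) + a_blocks
--     b_blocks = [0] * (max_len - len(b_blocks)) + b_blocks
--
--     result = []
--     carry = 0
--
--     # Adding block by block from right to left
--     for i in range(max_len - 1, -1, -1):
--         total = a_blocks[i] + b_blocks[i] + carry
--         result.insert(0, total % BASE)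
--         carry = total // BASE
--
--     if carry:
--         result.insert(0, carry)
--
--     return result
-- ===== SOURCE B (Python) =====
-- BASE = 10**4  # Block base (10000) - each block stores up to 4 digits
--
-- def add_big_numbers(a_blocks, b_blocks):
--     # Reconstruct each operand as one integer, add, then re-decompose by divmod.
--     max_len = max(len(a_blocks), len(b_blocks))
--     va = 0
--     for blk in a_blocks:
--         va = va * BASE + blk
--     vb = 0
--     for blk in b_blocks:
--         vb = vb * BASE + blk
--     s = va + vb
--     result = []
--     for _ in range(max_len):
--         s, d = divmod(s, BASE)
--         result.insert(0, d)
--     if s: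
--         result.insert(0, s)
--     return result
-- ===== Notes on version B (the rewrite author's own statement) =====
-- stated objective: alternative
-- what changed: Replaces the pad-then-index carry loop with value reconstruction: both operands are folded into single integers, added with built-in integer addition, and the sum is re-decomposed into blocks by repeated divmod.
import Mathlib
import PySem

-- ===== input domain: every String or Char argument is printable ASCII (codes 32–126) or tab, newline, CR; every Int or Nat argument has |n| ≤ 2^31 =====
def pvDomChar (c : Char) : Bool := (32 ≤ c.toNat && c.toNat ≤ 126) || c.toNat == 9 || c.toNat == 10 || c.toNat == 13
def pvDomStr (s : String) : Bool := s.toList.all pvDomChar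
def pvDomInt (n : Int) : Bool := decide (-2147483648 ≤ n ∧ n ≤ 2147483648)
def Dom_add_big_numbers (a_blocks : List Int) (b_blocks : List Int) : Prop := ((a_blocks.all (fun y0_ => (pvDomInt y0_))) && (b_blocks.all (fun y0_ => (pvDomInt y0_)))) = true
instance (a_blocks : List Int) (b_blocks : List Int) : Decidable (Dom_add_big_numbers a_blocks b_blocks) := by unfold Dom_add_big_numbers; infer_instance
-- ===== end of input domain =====

-- B replaces A's padded carry loop by fold-to-integer, add, divmod re-decomposition (alternative decomposition, same cost).

-- ===== PORT A =====
-- Literal port of A: pad both lists to max length, then scan indices right-to-left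
-- carrying (result, carry).  Indices produced by range(max_len-1,-1,-1) are always
-- in range of the padded lists, so pyGetD with default 0 is exact here.
def add_big_numbers (a_blocks : List Int) (b_blocks : List Int) : List Int :=
  let maxLen := max a_blocks.length b_blocks.length
  let ap := List.replicate (maxLen - a_blocks.length) 0 ++ a_blocks
  let bp := List.replicate (maxLen - b_blocks.length) 0 ++ b_blocks
  let st := (PySem.List.pyRange ((maxLen : Int) - 1) (-1) (-1)).foldl
    (fun (st : List Int × Int) i =>
      let total := PySem.List.pyGetD ap i 0 + PySem.List.pyGetD bp i 0 + st.2
      (PySem.Int.mod total 10000 :: st.1, PySem.Int.floordiv total 10000))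
    ([], 0)
  if st.2 ≠ 0 then st.2 :: st.1 else st.1

-- ===== PORT B =====
-- helper: va = 0; for blk in l: va = va*BASE + blk
def pvVal (l : List Int) : Int := l.foldl (fun acc blk => acc * 10000 + blk) 0

-- helper: for _ in range(n): s, d = divmod(s, BASE); result.insert(0, d)
def pvDecomp : Nat → Int × List Int → Int × List Int
  | 0, st => st
  | n + 1, (s, r) => pvDecomp n (PySem.Int.floordiv s 10000, PySem.Int.mod s 10000 :: r)

def add_big_numbers_alt (a_blocks : List Int) (b_blocks : List Int) : List Int :=
  let maxLen := max a_blocks.length b_blocks.length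
  let s := pvVal a_blocks + pvVal b_blocks
  let st := pvDecomp maxLen (s, [])
  if st.1 ≠ 0 then st.1 :: st.2 else st.2

-- ===== PRECONDITION & SPEC =====
def Spec_add_big_numbers (a_blocks : List Int) (b_blocks : List Int) (out : List Int) : Prop := out = add_big_numbers_alt a_blocks b_blocks
instance (a_blocks : List Int) (b_blocks : List Int) (out : List Int) : Decidable (Spec_add_big_numbers a_blocks b_blocks out) := by unfold Spec_add_big_numbers; infer_instance

-- ===== CLAIM (what is proved, stated in full; the proofs are below) =====
def Claim_equal_add_big_numbers : Prop := ∀ (a_blocks : List Int) (b_blocks : List Int), Dom_add_big_numbers a_blocks b_blocks → Spec_add_big_numbers a_blocks b_blocks (add_big_numbers a_blocks b_blocks)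

-- ===== LEMMAS AND PROOFS =====

-- leading zero blocks do not change the reconstructed value
lemma pvVal_replicate_zero_append (k : Nat) (l : List Int) :
    pvVal (List.replicate k 0 ++ l) = pvVal l := by
  induction k with
  | zero => rfl
  | succ n ih => simpa [pvVal, List.replicate_succ] using ih

lemma pvVal_take_succ (l : List Int) (m : Nat) (h : m < l.length) :
    pvVal (l.take (m + 1)) = pvVal (l.take m) * 10000 + l[m] := by
  rw [pvVal, pvVal, List.take_add_one, List.getElem?_eq_getElem h]
  rw [List.foldl_append]
  simp

-- core invariant: A's right-to-left carry scan over the first m positions equals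
-- B's divmod decomposition of (value of the first m blocks of each + carry)
lemma loop_eq (ap bp : List Int) (m : Nat) (c : Int) (r : List Int)
    (ha : m ≤ ap.length) (hb : m ≤ bp.length) :
    (PySem.List.pyRange ((m : Int) - 1) (-1) (-1)).foldl
      (fun (st : List Int × Int) i =>
        let total := PySem.List.pyGetD ap i 0 + PySem.List.pyGetD bp i 0 + st.2
        (PySem.Int.mod total 10000 :: st.1, PySem.Int.floordiv total 10000))
      (r, c)
    = (fun st => (st.2, st.1)) (pvDecomp m (pvVal (ap.take m) + pvVal (bp.take m) + c, r)) := by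
  induction m generalizing c r with
  | zero =>
    rw [PySem.List.pyRange_neg_one_eq_nil (by norm_num)]
    simp [pvDecomp, pvVal]
  | succ m ih =>
    have ham : m < ap.length := by omega
    have hbm : m < bp.length := by omega
    have hrw : ((m + 1 : Nat) : Int) - 1 = (m : Int) := by push_cast; ring
    rw [hrw, PySem.List.pyRange_neg_one_cons (by omega)]
    rw [List.foldl_cons]
    have hga : PySem.List.pyGetD ap (m : Int) 0 = ap[m] := PySem.List.pyGetD_ofNat ap m 0 ham
    have hgb : PySem.List.pyGetD bp (m : Int) 0 = bp[m] := PySem.List.pyGetD_ofNat bp m 0 hbm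
    simp only [hga, hgb]
    rw [ih _ _ (by omega) (by omega)]
    congr 1
    show pvDecomp m (_, _) = pvDecomp (m+1) (_, _)
    have hS : pvVal (ap.take (m+1)) + pvVal (bp.take (m+1)) + c
        = (pvVal (ap.take m) + pvVal (bp.take m)) * 10000 + (ap[m] + bp[m] + c) := by
      rw [pvVal_take_succ ap m ham, pvVal_take_succ bp m hbm]; ring
    show pvDecomp m (pvVal (ap.take m) + pvVal (bp.take m) +
        PySem.Int.floordiv (ap[m] + bp[m] + c) 10000,
        PySem.Int.mod (ap[m] + bp[m] + c) 10000 :: r) = _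
    rw [show pvDecomp (m+1) (pvVal (ap.take (m+1)) + pvVal (bp.take (m+1)) + c, r)
        = pvDecomp m (PySem.Int.floordiv (pvVal (ap.take (m+1)) + pvVal (bp.take (m+1)) + c) 10000,
            PySem.Int.mod (pvVal (ap.take (m+1)) + pvVal (bp.take (m+1)) + c) 10000 :: r) from rfl]
    set t := ap[m] + bp[m] + c
    set k := pvVal (ap.take m) + pvVal (bp.take m)
    have hm : PySem.Int.mod (k * 10000 + t) 10000 = PySem.Int.mod t 10000 := by
      rw [PySem.Int.mod_eq_emod_of_pos (by norm_num : (0:Int) < 10000), PySem.Int.mod_eq_emod_of_pos (by norm_num : (0:Int) < 10000)]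
      omega
    have hd : PySem.Int.floordiv (k * 10000 + t) 10000 = k + PySem.Int.floordiv t 10000 := by
      rw [PySem.Int.floordiv_eq_ediv_of_pos (by norm_num : (0:Int) < 10000), PySem.Int.floordiv_eq_ediv_of_pos (by norm_num : (0:Int) < 10000)]
      rw [add_comm (k * 10000) t, Int.add_mul_ediv_right _ _ (by norm_num)]
      ring
    rw [hS, hm, hd, add_comm k]

-- ===== VERDICT (by name: the statement is the Claim_ definition above) =====
theorem add_big_numbers_spec : Claim_equal_add_big_numbers := by
  intro a b _
  show add_big_numbers a b = add_big_numbers_alt a b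
  simp only [add_big_numbers, add_big_numbers_alt]
  have hla : (List.replicate (max a.length b.length - a.length) (0:Int) ++ a).length
      = max a.length b.length := by simp
  have hlb : (List.replicate (max a.length b.length - b.length) (0:Int) ++ b).length
      = max a.length b.length := by simp
  rw [loop_eq _ _ (max a.length b.length) 0 [] (by omega) (by omega)]
  rw [List.take_of_length_le (by omega), List.take_of_length_le (by omega)]
  rw [pvVal_replicate_zero_append, pvVal_replicate_zero_append]
  simp
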